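-- pv_equiv track=rewrite | github.com/itachi-hue/argus | server/src/argus/core/filters.py | _domain_blocked
-- ===== SOURCE A (Python) =====
-- def _domain_blocked(domain: str, blocked: set[str], allowed: set[str]) -> bool:
--     if domain in allowed:
--         return False
--     if domain in blocked:
--         return True
--     # Check parent domains: sub.example.com → example.com
--     parts = domain.split(".")
--     for i in range(1, len(parts)):
--         parent = ".".join(parts[i:])
--         if parent in allowed:
--             return False
--         if parent in blocked:
--             return True
--     return False
-- ===== SOURCE B (Python) =====
-- def _domain_blocked(domain: str, blocked: set[str], allowed: set[str]) -> bool: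
--     if domain in allowed:
--         return False
--     if domain in blocked:
--         return True
--     _head, sep, tail = domain.partition(".")
--     if not sep:
--         return False
--     return _domain_blocked(tail, blocked, allowed)
-- ===== Notes on version B (the rewrite author's own statement) =====
-- stated objective: simpler
-- what changed: Replaces the split-into-parts list plus an index loop that re-joins every suffix with a direct recursion that strips one label per step via partition('.'), never materialising the parts list or re-joining suffixes.
import Mathlib
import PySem

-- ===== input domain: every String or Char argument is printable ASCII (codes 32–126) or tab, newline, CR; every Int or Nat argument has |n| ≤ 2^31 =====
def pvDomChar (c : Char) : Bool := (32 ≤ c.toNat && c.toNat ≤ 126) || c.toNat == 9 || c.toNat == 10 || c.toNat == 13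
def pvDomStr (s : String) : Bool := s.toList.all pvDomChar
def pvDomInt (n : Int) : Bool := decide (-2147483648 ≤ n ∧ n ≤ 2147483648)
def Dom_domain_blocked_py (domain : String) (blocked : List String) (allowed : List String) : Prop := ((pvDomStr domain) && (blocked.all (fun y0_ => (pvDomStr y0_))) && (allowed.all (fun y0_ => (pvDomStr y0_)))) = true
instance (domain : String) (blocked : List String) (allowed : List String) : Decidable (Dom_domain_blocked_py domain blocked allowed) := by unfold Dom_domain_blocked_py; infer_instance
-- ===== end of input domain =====

-- B replaces A's parts-list + index loop (re-joining every suffix) by a recursion that strips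
-- one label per step with partition('.'); a different decomposition, not claimed faster.


-- ===== PORT A =====
-- the for-loop over range(1, len(parts)) with its early returns, as structural recursion on the range list
def aLoop (parts blocked allowed : List String) : List Int → Bool
  | [] => false
  | i :: is =>
    let parent := PySem.Str.join "." (PySem.List.slice parts (some i) none)   -- ".".join(parts[i:])
    if allowed.contains parent then false
    else if blocked.contains parent then true
    else aLoop parts blocked allowed is

def domain_blocked_py (domain : String) (blocked : List String) (allowed : List String) : Bool :=
  if allowed.contains domain then false
  else if blocked.contains domain then true
  else
    -- domain.split("."): sep "." ≠ "" so split? is always `some`; getD [] never fires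
    let parts : List String := (PySem.Str.split? domain ".").getD []
    aLoop parts blocked allowed (PySem.List.pyRange 1 parts.length)

-- ===== PORT B =====
-- termination helper for altGo (the recursion argument shrinks when a '.' is present)
theorem pvDropTail_lt (cs : List Char) (h : cs.contains '.' = true) :
    ((cs.dropWhile (fun ch => !(ch == '.'))).tail).length < cs.length := by
  have hne : cs.dropWhile (fun ch => !(ch == '.')) ≠ [] := by
    intro hnil
    rw [List.dropWhile_eq_nil_iff] at hnil
    have hmem : '.' ∈ cs := by simpa using h
    have := hnil '.' hmem
    simp at this
  have hle := List.length_dropWhile_le (fun ch => !(ch == '.')) cs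
  cases hd : cs.dropWhile (fun ch => !(ch == '.')) with
  | nil => exact absurd hd hne
  | cons a l =>
    rw [hd] at hle
    simp at hle ⊢
    omega

-- recursive core of B over the code points; domain.partition(".") is ported by hand as
-- takeWhile/dropWhile at the first '.', which is exact for a single-character separator
def altGo (blocked allowed : List String) (cs : List Char) : Bool :=
  let s := String.ofList cs
  if allowed.contains s then false
  else if blocked.contains s then true
  else if h : cs.contains '.' then
    altGo blocked allowed ((cs.dropWhile (fun ch => !(ch == '.'))).tail)
  else false
termination_by cs.length
decreasing_by exact pvDropTail_lt cs h

def domain_blocked_py_alt (domain : String) (blocked : List String) (allowed : List String) : Bool :=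
  altGo blocked allowed domain.toList

-- ===== PRECONDITION & SPEC =====
def Spec_domain_blocked_py (domain : String) (blocked : List String) (allowed : List String) (out : Bool) : Prop := out = domain_blocked_py_alt domain blocked allowed
instance (domain : String) (blocked : List String) (allowed : List String) (out : Bool) : Decidable (Spec_domain_blocked_py domain blocked allowed out) := by unfold Spec_domain_blocked_py; infer_instance

-- ===== CLAIM (what is proved, stated in full; the proofs are below) =====
def Claim_equal_domain_blocked_py : Prop := ∀ (domain : String) (blocked : List String) (allowed : List String), Dom_domain_blocked_py domain blocked allowed → Spec_domain_blocked_py domain blocked allowed (domain_blocked_py domain blocked allowed)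

-- ===== LEMMAS AND PROOFS =====

-- common reference function: check each suffix of the parts list, most specific first
def sufChk (blocked allowed : List String) : List (List Char) → Bool
  | [] => false
  | ps :: pss =>
    let s := String.ofList (List.intercalate ['.'] (ps :: pss))
    if allowed.contains s then false
    else if blocked.contains s then true
    else sufChk blocked allowed pss

theorem splitOn_go_eq (fuel : Nat) (l cur : List Char) (acc : List (List Char))
    (h : l.length ≤ fuel) :
    PySem.Chars.splitOn.go ['.'] fuel l cur acc =
      acc.reverse ++ (List.splitOnP (fun x => x == '.') l).modifyHead (cur.reverse ++ ·) := by
  induction fuel generalizing l cur acc with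
  | zero =>
    have : l = [] := by cases l <;> simp_all
    subst this
    simp [PySem.Chars.splitOn.go, List.splitOnP_nil]
  | succ fuel ih =>
    cases l with
    | nil => simp [PySem.Chars.splitOn.go, List.splitOnP_nil]
    | cons c rest =>
      simp only [List.length_cons, Nat.add_le_add_iff_right] at h
      by_cases hc : c = '.'
      · subst hc
        have hpre : List.isPrefixOf ['.'] ('.' :: rest) = true := by simp [List.isPrefixOf]
        rw [PySem.Chars.splitOn.go]
        simp only [hpre, if_true, List.length_cons, List.length_nil, List.drop_succ_cons, List.drop_zero]
        rw [ih rest [] (cur.reverse :: acc) h]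
        rw [List.splitOnP_cons]
        simp only [beq_self_eq_true, if_true, List.modifyHead_cons, List.append_nil, List.reverse_cons, List.append_assoc]
        cases List.splitOnP (fun x => x == '.') rest <;> simp
      · have hpre : List.isPrefixOf ['.'] (c :: rest) = false := by
          simp [List.isPrefixOf]
          intro h'; exact hc h'.symm
        rw [PySem.Chars.splitOn.go]
        rw [if_neg (by simp [hpre])]
        rw [ih rest (c :: cur) acc h]
        rw [List.splitOnP_cons]
        rw [if_neg (by simp [hc])]
        have hne := List.splitOnP_ne_nil (fun x => x == '.') rest
        cases hys : List.splitOnP (fun x => x == '.') rest with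
        | nil => exact absurd hys hne
        | cons y ys =>
          simp [List.modifyHead, List.append_assoc]

theorem splitOn_eq (cs : List Char) :
    PySem.Chars.splitOn cs ['.'] = List.splitOnP (fun x => x == '.') cs := by
  rw [PySem.Chars.splitOn, splitOn_go_eq _ _ _ _ (by omega)]
  cases List.splitOnP (fun x => x == '.') cs <;> simp

theorem splitOnP_no_dot (cs : List Char) (h : cs.contains '.' = false) :
    List.splitOnP (fun x => x == '.') cs = [cs] := by
  apply List.splitOnP_eq_single
  intro x hx
  simp only [List.contains_eq_mem, decide_eq_false_iff_not] at h
  simp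
  intro hx'
  exact h (hx' ▸ hx)

theorem splitOnP_first_dot (cs : List Char) (h : cs.contains '.' = true) :
    List.splitOnP (fun x => x == '.') cs =
      cs.takeWhile (fun ch => !(ch == '.')) ::
        List.splitOnP (fun x => x == '.') ((cs.dropWhile (fun ch => !(ch == '.'))).tail) := by
  induction cs with
  | nil => simp at h
  | cons x xs ih =>
    by_cases hx : x = '.'
    · subst hx
      simp [List.splitOnP_cons, List.takeWhile, List.dropWhile]
    · have hxs : xs.contains '.' = true := by
        simp only [List.contains_eq_mem, decide_eq_true_eq] at h ⊢
        cases h with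
        | head => exact absurd rfl hx
        | tail _ hm => exact hm
      rw [List.splitOnP_cons, if_neg (by simp [hx])]
      rw [ih hxs]
      have ht : (x :: xs).takeWhile (fun ch => !(ch == '.')) = x :: xs.takeWhile (fun ch => !(ch == '.')) := by
        simp [List.takeWhile_cons, hx]
      have hd : (x :: xs).dropWhile (fun ch => !(ch == '.')) = xs.dropWhile (fun ch => !(ch == '.')) := by
        simp [List.dropWhile_cons, hx]
      rw [ht, hd]
      simp [List.modifyHead]

theorem intercalate_splitOnP (cs : List Char) :
    List.intercalate ['.'] (List.splitOnP (fun x => x == '.') cs) = cs := by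
  simpa [List.splitOn] using List.intercalate_splitOn cs '.'

theorem altGo_eq_sufChk (blocked allowed : List String) (cs : List Char) :
    altGo blocked allowed cs = sufChk blocked allowed (List.splitOnP (fun x => x == '.') cs) := by
  have key : ∀ (n : Nat) (cs : List Char), cs.length ≤ n →
      altGo blocked allowed cs = sufChk blocked allowed (List.splitOnP (fun x => x == '.') cs) := by
    intro n
    induction n with
    | zero =>
      intro cs hl
      have : cs = [] := by cases cs <;> simp_all
      subst this
      rw [altGo]
      simp [sufChk, List.splitOnP_nil, List.intercalate]
    | succ n ih =>
      intro cs hl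
      rw [altGo]
      cases hdot : cs.contains '.' with
      | false =>
        rw [splitOnP_no_dot cs hdot]
        simp only [sufChk, List.intercalate, List.intersperse, List.flatten]
        simp [hdot, sufChk]
      | true =>
        rw [splitOnP_first_dot cs hdot]
        simp only [sufChk]
        rw [← splitOnP_first_dot cs hdot, intercalate_splitOnP]
        have hlt := pvDropTail_lt cs hdot
        rw [ih _ (by omega)]
        simp
  exact key cs.length cs le_rfl

theorem aLoop_eq_sufChk (blocked allowed : List String) (qs : List (List Char)) (i : Nat) :
    aLoop (qs.map String.ofList) blocked allowed
        (PySem.List.pyRange i (qs.map String.ofList).length) =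
      sufChk blocked allowed (qs.drop i) := by
  have key : ∀ (k i : Nat), qs.length - i ≤ k →
      aLoop (qs.map String.ofList) blocked allowed
          (PySem.List.pyRange i (qs.map String.ofList).length) =
        sufChk blocked allowed (qs.drop i) := by
    intro k
    induction k with
    | zero =>
      intro i hk
      have hge : qs.length ≤ i := by omega
      have hnil : PySem.List.pyRange (i : Int) ((qs.map String.ofList).length : Int) = [] := by
        apply List.eq_nil_of_length_eq_zero
        rw [PySem.List.length_pyRange_one]
        simp
        omega
      rw [hnil]
      rw [List.drop_eq_nil_of_le (by simpa using hge)]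
      simp [aLoop, sufChk]
    | succ k ih =>
      intro i hk
      by_cases hge : qs.length ≤ i
      · have hnil : PySem.List.pyRange (i : Int) ((qs.map String.ofList).length : Int) = [] := by
          apply List.eq_nil_of_length_eq_zero
          rw [PySem.List.length_pyRange_one]
          simp
          omega
        rw [hnil]
        rw [List.drop_eq_nil_of_le (by simpa using hge)]
        simp [aLoop, sufChk]
      · have hlt : (i : Int) < ((qs.map String.ofList).length : Int) := by simp; omega
        rw [PySem.List.pyRange_one_cons hlt]
        have hdrop : qs.drop i = qs[i] :: qs.drop (i + 1) := by
          rw [List.drop_eq_getElem_cons (by omega)]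
        simp only [aLoop]
        have hsl : PySem.List.slice (qs.map String.ofList) (some (i : Int)) none =
            (qs.drop i).map String.ofList := by
          rw [PySem.List.slice_from_natCast]
          rw [List.map_drop]
        rw [hsl]
        have hjoin : PySem.Str.join "." ((qs.drop i).map String.ofList) =
            String.ofList (List.intercalate ['.'] (qs.drop i)) := by
          simp [PySem.Str.join, PySem.Chars.join, List.intercalate, List.map_map,
                Function.comp_def]
        rw [hjoin]
        have hcast : ((i : Int) + 1) = ((i + 1 : Nat) : Int) := by push_cast; ring
        rw [hcast, ih (i + 1) (by omega)]
        rw [hdrop]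
        simp only [sufChk]
  exact key (qs.length - i) i le_rfl

-- ===== VERDICT (by name: the statement is the Claim_ definition above) =====
theorem domain_blocked_py_spec : Claim_equal_domain_blocked_py := by
  intro domain blocked allowed _
  unfold Spec_domain_blocked_py domain_blocked_py domain_blocked_py_alt
  rw [altGo_eq_sufChk]
  have hsplit : PySem.Str.split? domain "." =
      some ((List.splitOnP (fun x => x == '.') domain.toList).map String.ofList) := by
    simp [PySem.Str.split?, PySem.Chars.split?, splitOn_eq]
  simp only [hsplit, Option.getD_some]
  have haux := aLoop_eq_sufChk blocked allowed (List.splitOnP (fun x => x == '.') domain.toList) 1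
  push_cast at haux
  rw [haux]
  cases hq : List.splitOnP (fun x => x == '.') domain.toList with
  | nil => exact absurd hq (List.splitOnP_ne_nil _ _)
  | cons q qt =>
    have hs : String.ofList (List.intercalate ['.'] (q :: qt)) = domain := by
      rw [← hq, intercalate_splitOnP]
      simp
    simp only [sufChk, hs, List.drop_one, List.tail_cons]
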